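-- pv_equiv track=rewrite | github.com/sdiasricardo/MC102 | lab12.py | borda_quadrado
-- ===== SOURCE A (Python) =====
-- def borda_quadrado(ci, cj, l, matriz):
--     """Função que desenha as bordas de um quadrado lado l (sempre ímpar) centrado no ponto (cx, cy)
--     em uma matriz."""
--     for i in range(len(matriz)):
--             for j in range(len(matriz[0])):
--                 if (i == ci - l//2 or i == ci + l//2) and (cj - l//2 <= j <= cj + l//2): # Desenhando as bordas
--                     # de cima e de baixo
--                     matriz[i][j] = "x"
--                 elif (ci - l//2 <= i <= ci + l//2) and (j == cj - l//2 or j == cj + l//2): # Desenhando as bordas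
--                     # esquerda e direita
--                     matriz[i][j] = "x"
--     return matriz
-- ===== SOURCE B (Python) =====
-- def borda_quadrado(ci, cj, l, matriz):
--     """Draws the border of the square of side l centred at (ci, cj) by writing
--     only the four clipped sides directly (O(l) writes instead of scanning the
--     whole matrix). Mutates matriz in place, like the original."""
--     if not matriz:
--         return matriz
--     n, m = len(matriz), len(matriz[0])
--     h = l // 2
--     for r in (ci - h, ci + h):
--         if 0 <= r < n:
--             for j in range(max(0, cj - h), min(m - 1, cj + h) + 1):
--                 matriz[r][j] = "x"
--     for c in (cj - h, cj + h):
--         if 0 <= c < m: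
--             for i in range(max(0, ci - h), min(n - 1, ci + h) + 1):
--                 matriz[i][c] = "x"
--     return matriz
-- ===== Notes on version B (the rewrite author's own statement) =====
-- stated objective: faster
-- what changed: Instead of scanning every cell of the matrix and testing whether it lies on the border, B writes the four sides of the square directly, clipping each side's index range to the matrix bounds, so only the border cells are touched.
import Mathlib
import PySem

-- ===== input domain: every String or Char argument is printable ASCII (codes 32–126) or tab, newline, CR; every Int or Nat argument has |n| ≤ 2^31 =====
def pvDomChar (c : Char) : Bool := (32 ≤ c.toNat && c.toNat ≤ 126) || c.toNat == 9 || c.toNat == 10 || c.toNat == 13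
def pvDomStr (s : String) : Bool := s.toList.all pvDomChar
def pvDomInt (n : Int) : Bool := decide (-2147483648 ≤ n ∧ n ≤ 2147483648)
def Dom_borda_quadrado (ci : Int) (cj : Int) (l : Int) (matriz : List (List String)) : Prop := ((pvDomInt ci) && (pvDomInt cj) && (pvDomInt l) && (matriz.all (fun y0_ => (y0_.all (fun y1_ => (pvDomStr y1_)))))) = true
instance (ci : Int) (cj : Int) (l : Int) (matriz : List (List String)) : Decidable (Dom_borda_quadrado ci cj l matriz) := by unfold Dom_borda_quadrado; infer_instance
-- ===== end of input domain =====

-- B draws only the four clipped sides of the square (O(l) writes) instead of scanning all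
-- n*m cells; both mutate matriz in place in Python — the equivalence proved is about the
-- returned matrix value.

-- ===== PORT A =====
-- matriz[i][j] = "x" (write is exact when i, j are in range; out of range Python raises,
-- which Pre_ excludes — there the Lean write is a no-op)
def pvWrite (mat : List (List String)) (i j : Nat) : List (List String) :=
  mat.set i (((mat[i]?).getD []).set j "x")

def borda_quadrado (ci : Int) (cj : Int) (l : Int) (matriz : List (List String)) : List (List String) :=
  (List.range matriz.length).foldl (fun mat (i : Nat) =>
    (List.range (matriz.headD []).length).foldl (fun mat (j : Nat) =>
      if ((i : Int) = ci - PySem.Int.floordiv l (2 : Int) ∨ (i : Int) = ci + PySem.Int.floordiv l (2 : Int)) ∧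
         (cj - PySem.Int.floordiv l (2 : Int) ≤ (j : Int) ∧ (j : Int) ≤ cj + PySem.Int.floordiv l (2 : Int)) then
        pvWrite mat i j
      else if (ci - PySem.Int.floordiv l (2 : Int) ≤ (i : Int) ∧ (i : Int) ≤ ci + PySem.Int.floordiv l (2 : Int)) ∧
              ((j : Int) = cj - PySem.Int.floordiv l (2 : Int) ∨ (j : Int) = cj + PySem.Int.floordiv l (2 : Int)) then
        pvWrite mat i j
      else mat) mat) matriz

-- ===== PORT B =====
-- the .toNat conversions are guarded: r, c are checked non-negative and the pyRange
-- elements are ≥ max 0 …, so they match Python's non-negative indices exactly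
def pvTopBot (_ci : Int) (cj : Int) (l : Int) (n : Int) (m : Int) (mat : List (List String)) (r : Int) : List (List String) :=
  if 0 ≤ r ∧ r < n then
    (PySem.List.pyRange (max (0 : Int) (cj - PySem.Int.floordiv l (2 : Int))) (min (m - (1 : Int)) (cj + PySem.Int.floordiv l (2 : Int)) + (1 : Int)) (1 : Int)).foldl
      (fun mat t => pvWrite mat r.toNat t.toNat) mat
  else mat

def pvSide (ci : Int) (_cj : Int) (l : Int) (n : Int) (m : Int) (mat : List (List String)) (c : Int) : List (List String) :=
  if 0 ≤ c ∧ c < m then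
    (PySem.List.pyRange (max (0 : Int) (ci - PySem.Int.floordiv l (2 : Int))) (min (n - (1 : Int)) (ci + PySem.Int.floordiv l (2 : Int)) + (1 : Int)) (1 : Int)).foldl
      (fun mat t => pvWrite mat t.toNat c.toNat) mat
  else mat

def borda_quadrado_alt (ci : Int) (cj : Int) (l : Int) (matriz : List (List String)) : List (List String) :=
  if matriz = [] then matriz else
  [cj - PySem.Int.floordiv l (2 : Int), cj + PySem.Int.floordiv l (2 : Int)].foldl
    (pvSide ci cj l matriz.length (matriz.headD []).length)
    ([ci - PySem.Int.floordiv l (2 : Int), ci + PySem.Int.floordiv l (2 : Int)].foldl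
      (pvTopBot ci cj l matriz.length (matriz.headD []).length) matriz)

-- ===== PRECONDITION & SPEC =====
-- Pre_ excludes exactly the ragged matrices on which a border cell of the square falls
-- beyond its own row's length: there Python A raises IndexError (it iterates j up to
-- len(matriz[0]) but writes into row i).
def Pre_borda_quadrado (ci : Int) (cj : Int) (l : Int) (matriz : List (List String)) : Prop :=
  ∀ i < matriz.length, ∀ j < (matriz.headD []).length,
    ((((i : Int) = ci - PySem.Int.floordiv l (2 : Int) ∨ (i : Int) = ci + PySem.Int.floordiv l (2 : Int)) ∧
      (cj - PySem.Int.floordiv l (2 : Int) ≤ (j : Int) ∧ (j : Int) ≤ cj + PySem.Int.floordiv l (2 : Int))) ∨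
     ((ci - PySem.Int.floordiv l (2 : Int) ≤ (i : Int) ∧ (i : Int) ≤ ci + PySem.Int.floordiv l (2 : Int)) ∧
      ((j : Int) = cj - PySem.Int.floordiv l (2 : Int) ∨ (j : Int) = cj + PySem.Int.floordiv l (2 : Int)))) →
    j < (matriz.getD i []).length

instance (ci : Int) (cj : Int) (l : Int) (matriz : List (List String)) : Decidable (Pre_borda_quadrado ci cj l matriz) := by
  unfold Pre_borda_quadrado; infer_instance

def pvWitness_borda_quadrado : Int × Int × Int × List (List String) :=
  (1, 1, 3, [["a", "a", "a"], ["a", "a", "a"], ["a", "a", "a"]])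

def Spec_borda_quadrado (ci : Int) (cj : Int) (l : Int) (matriz : List (List String)) (out : List (List String)) : Prop := out = borda_quadrado_alt ci cj l matriz
instance (ci : Int) (cj : Int) (l : Int) (matriz : List (List String)) (out : List (List String)) : Decidable (Spec_borda_quadrado ci cj l matriz out) := by unfold Spec_borda_quadrado; infer_instance

-- ===== CLAIM (what is proved, stated in full; the proofs are below) =====
def Claim_equal_borda_quadrado : Prop := ∀ (ci : Int) (cj : Int) (l : Int) (matriz : List (List String)), Dom_borda_quadrado ci cj l matriz → Pre_borda_quadrado ci cj l matriz → Spec_borda_quadrado ci cj l matriz (borda_quadrado ci cj l matriz)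

-- ===== LEMMAS AND PROOFS =====

def rowLen (mat : List (List String)) (i : Nat) : Nat := ((mat[i]?).getD []).length
def cellOf (mat : List (List String)) (i j : Nat) : Option String := ((mat[i]?).getD [])[j]?

theorem rowLen_pvWrite (mat : List (List String)) (a b i : Nat) :
    rowLen (pvWrite mat a b) i = rowLen mat i := by
  unfold rowLen pvWrite
  by_cases hia : i = a
  · subst hia
    by_cases hlt : i < mat.length
    · simp [hlt]
    · simp [hlt]
  · simp [Ne.symm hia]

theorem cellOf_pvWrite (mat : List (List String)) (a b i j : Nat) :
    cellOf (pvWrite mat a b) i j =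
      if i = a ∧ j = b ∧ j < rowLen mat i then some "x" else cellOf mat i j := by
  unfold cellOf pvWrite rowLen
  by_cases hia : i = a
  · subst hia
    by_cases hlt : i < mat.length
    · have hgd : (mat[i]?).getD [] = mat[i] := by simp [List.getElem?_eq_getElem hlt]
      rw [hgd]
      by_cases hjb : j = b
      · subst hjb
        by_cases hbl : j < (mat[i]).length
        · simp [hlt, hbl]
        · simp [hlt, hbl]
      · simp [hlt, Ne.symm hjb, hjb]
    · simp [hlt]
  · simp [hia, Ne.symm hia]

theorem cellOf_foldl {α : Type} (f : List (List String) → α → List (List String))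
    (W : α → Nat → Nat → Prop) [instW : ∀ a i j, Decidable (W a i j)]
    (hlen : ∀ mat a i, rowLen (f mat a) i = rowLen mat i)
    (hcell : ∀ mat a i j, cellOf (f mat a) i j =
        if W a i j ∧ j < rowLen mat i then some "x" else cellOf mat i j)
    (L : List α) (mat : List (List String)) (i j : Nat) :
    cellOf (L.foldl f mat) i j =
      if (∃ a ∈ L, W a i j) ∧ j < rowLen mat i then some "x" else cellOf mat i j := by
  induction L generalizing mat with
  | nil => simp
  | cons a L ih =>
    rw [List.foldl_cons, ih, hlen, hcell]
    simp only [List.exists_mem_cons_iff]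
    by_cases hj : j < rowLen mat i
    · by_cases hW : W a i j
      · simp [hj, hW]
      · by_cases hE : ∃ x ∈ L, W x i j
        · simp [hj, hW, hE]
        · simp [hj, hW, hE]
    · simp [hj]

theorem rowLen_foldl {α : Type} (f : List (List String) → α → List (List String))
    (hlen : ∀ mat a i, rowLen (f mat a) i = rowLen mat i)
    (L : List α) (mat : List (List String)) (i : Nat) :
    rowLen (L.foldl f mat) i = rowLen mat i := by
  induction L generalizing mat with
  | nil => rfl
  | cons a L ih => rw [List.foldl_cons, ih, hlen]

theorem length_foldl {α : Type} (f : List (List String) → α → List (List String))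
    (hlen : ∀ mat a, (f mat a).length = mat.length)
    (L : List α) (mat : List (List String)) :
    (L.foldl f mat).length = mat.length := by
  induction L generalizing mat with
  | nil => rfl
  | cons a L ih => rw [List.foldl_cons, ih, hlen]

theorem eq_of_cells (m1 m2 : List (List String)) (hlen : m1.length = m2.length)
    (hcell : ∀ i j, cellOf m1 i j = cellOf m2 i j) : m1 = m2 := by
  apply List.ext_getElem?
  intro i
  by_cases hi : i < m1.length
  · have hi2 : i < m2.length := hlen ▸ hi
    rw [List.getElem?_eq_getElem hi, List.getElem?_eq_getElem hi2]
    have hrow : m1[i] = m2[i] := by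
      apply List.ext_getElem?
      intro j
      have h := hcell i j
      unfold cellOf at h
      rwa [List.getElem?_eq_getElem hi, List.getElem?_eq_getElem hi2, Option.getD_some, Option.getD_some] at h
    rw [hrow]
  · rw [List.getElem?_eq_none (by omega), List.getElem?_eq_none (by omega)]

theorem length_pvWrite (mat : List (List String)) (a b : Nat) :
    (pvWrite mat a b).length = mat.length := by
  simp [pvWrite]

abbrev hh (l : Int) : Int := PySem.Int.floordiv l (2 : Int)

abbrev Acond (ci cj l : Int) (i j : Int) : Prop :=
  ((i = ci - hh l ∨ i = ci + hh l) ∧ (cj - hh l ≤ j ∧ j ≤ cj + hh l)) ∨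
  ((ci - hh l ≤ i ∧ i ≤ ci + hh l) ∧ (j = cj - hh l ∨ j = cj + hh l))

theorem A_inner_cell (ci cj l : Int) (m a : Nat) (mat : List (List String)) (i j : Nat) :
    cellOf ((List.range m).foldl (fun mat (b : Nat) =>
      if ((a : Int) = ci - PySem.Int.floordiv l (2 : Int) ∨ (a : Int) = ci + PySem.Int.floordiv l (2 : Int)) ∧
         (cj - PySem.Int.floordiv l (2 : Int) ≤ (b : Int) ∧ (b : Int) ≤ cj + PySem.Int.floordiv l (2 : Int)) then
        pvWrite mat a b
      else if (ci - PySem.Int.floordiv l (2 : Int) ≤ (a : Int) ∧ (a : Int) ≤ ci + PySem.Int.floordiv l (2 : Int)) ∧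
              ((b : Int) = cj - PySem.Int.floordiv l (2 : Int) ∨ (b : Int) = cj + PySem.Int.floordiv l (2 : Int)) then
        pvWrite mat a b
      else mat) mat) i j =
    if (i = a ∧ j < m ∧ Acond ci cj l a j) ∧ j < rowLen mat i then some "x" else cellOf mat i j := by
  refine (cellOf_foldl _ (fun (b : Nat) i' j' => i' = a ∧ j' = b ∧ Acond ci cj l a b) ?_ ?_ _ _ _ _).trans ?_
  · intro mat b i'
    split_ifs <;> simp [rowLen_pvWrite]
  · intro mat b i' j'
    by_cases h1 : ((a : Int) = ci - PySem.Int.floordiv l (2 : Int) ∨ (a : Int) = ci + PySem.Int.floordiv l (2 : Int)) ∧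
         (cj - PySem.Int.floordiv l (2 : Int) ≤ (b : Int) ∧ (b : Int) ≤ cj + PySem.Int.floordiv l (2 : Int))
    · rw [if_pos h1, cellOf_pvWrite]
      apply if_congr _ rfl rfl
      unfold Acond; tauto
    · rw [if_neg h1]
      by_cases h2 : (ci - PySem.Int.floordiv l (2 : Int) ≤ (a : Int) ∧ (a : Int) ≤ ci + PySem.Int.floordiv l (2 : Int)) ∧
              ((b : Int) = cj - PySem.Int.floordiv l (2 : Int) ∨ (b : Int) = cj + PySem.Int.floordiv l (2 : Int))
      · rw [if_pos h2, cellOf_pvWrite]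
        apply if_congr _ rfl rfl
        unfold Acond; tauto
      · rw [if_neg h2, if_neg (by rintro ⟨⟨rfl, rfl, hc⟩, -⟩; unfold Acond at hc; tauto)]
  · apply if_congr _ rfl rfl
    constructor
    · rintro ⟨⟨b, hb, rfl, rfl, hc⟩, hr⟩
      exact ⟨⟨rfl, by simpa using hb, hc⟩, hr⟩
    · rintro ⟨⟨rfl, hm, hc⟩, hr⟩
      exact ⟨⟨j, by simpa using hm, rfl, rfl, hc⟩, hr⟩

theorem A_cell (ci cj l : Int) (matriz : List (List String)) (i j : Nat) :
    cellOf (borda_quadrado ci cj l matriz) i j =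
      if (i < matriz.length ∧ j < (matriz.headD []).length ∧ Acond ci cj l i j) ∧ j < rowLen matriz i
      then some "x" else cellOf matriz i j := by
  unfold borda_quadrado
  refine (cellOf_foldl _ (fun (a : Nat) i' j' => i' = a ∧ j' < (matriz.headD []).length ∧ Acond ci cj l a j') ?_ ?_ _ _ _ _).trans ?_
  · intro mat a i'
    exact rowLen_foldl _ (by intro mat b i''; split_ifs <;> simp [rowLen_pvWrite]) _ _ _
  · intro mat a i' j'
    exact A_inner_cell ci cj l _ a mat i' j'
  · apply if_congr _ rfl rfl
    constructor
    · rintro ⟨⟨a, ha, rfl, hm, hc⟩, hr⟩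
      exact ⟨⟨by simpa using ha, hm, hc⟩, hr⟩
    · rintro ⟨⟨hn, hm, hc⟩, hr⟩
      exact ⟨⟨i, by simpa using hn, rfl, hm, hc⟩, hr⟩

abbrev Bc1 (ci cj l : Int) (n m : Int) (i j : Nat) : Prop :=
  ∃ r ∈ [ci - PySem.Int.floordiv l (2 : Int), ci + PySem.Int.floordiv l (2 : Int)], ((0 ≤ r ∧ r < n) ∧
    ∃ t ∈ PySem.List.pyRange (max (0 : Int) (cj - PySem.Int.floordiv l (2 : Int))) (min (m - (1 : Int)) (cj + PySem.Int.floordiv l (2 : Int)) + (1 : Int)) (1 : Int),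
      i = r.toNat ∧ j = t.toNat)

abbrev Bc2 (ci cj l : Int) (n m : Int) (i j : Nat) : Prop :=
  ∃ c ∈ [cj - PySem.Int.floordiv l (2 : Int), cj + PySem.Int.floordiv l (2 : Int)], ((0 ≤ c ∧ c < m) ∧
    ∃ t ∈ PySem.List.pyRange (max (0 : Int) (ci - PySem.Int.floordiv l (2 : Int))) (min (n - (1 : Int)) (ci + PySem.Int.floordiv l (2 : Int)) + (1 : Int)) (1 : Int),
      i = t.toNat ∧ j = c.toNat)

theorem rowLen_pvTopBot (ci cj l n m : Int) (mat : List (List String)) (r : Int) (i : Nat) :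
    rowLen (pvTopBot ci cj l n m mat r) i = rowLen mat i := by
  unfold pvTopBot
  split_ifs
  · exact rowLen_foldl _ (fun _ _ _ => rowLen_pvWrite _ _ _ _) _ _ _
  · rfl

theorem rowLen_pvSide (ci cj l n m : Int) (mat : List (List String)) (c : Int) (i : Nat) :
    rowLen (pvSide ci cj l n m mat c) i = rowLen mat i := by
  unfold pvSide
  split_ifs
  · exact rowLen_foldl _ (fun _ _ _ => rowLen_pvWrite _ _ _ _) _ _ _
  · rfl

theorem cellOf_pvTopBot (ci cj l n m : Int) (mat : List (List String)) (r : Int) (i j : Nat) :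
    cellOf (pvTopBot ci cj l n m mat r) i j =
      if (((0 ≤ r ∧ r < n) ∧
            ∃ t ∈ PySem.List.pyRange (max (0 : Int) (cj - PySem.Int.floordiv l (2 : Int))) (min (m - (1 : Int)) (cj + PySem.Int.floordiv l (2 : Int)) + (1 : Int)) (1 : Int),
              i = r.toNat ∧ j = t.toNat) ∧ j < rowLen mat i)
      then some "x" else cellOf mat i j := by
  unfold pvTopBot
  by_cases hg : 0 ≤ r ∧ r < n
  · rw [if_pos hg]
    refine (cellOf_foldl _ (fun (t : Int) i' j' => i' = r.toNat ∧ j' = t.toNat)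
        (fun mat t i' => rowLen_pvWrite _ _ _ _) ?_ _ _ _ _).trans ?_
    · intro mat t i' j'
      rw [cellOf_pvWrite]
      apply if_congr _ rfl rfl
      tauto
    · apply if_congr _ rfl rfl
      tauto
  · rw [if_neg hg, if_neg (by tauto)]

theorem cellOf_pvSide (ci cj l n m : Int) (mat : List (List String)) (c : Int) (i j : Nat) :
    cellOf (pvSide ci cj l n m mat c) i j =
      if (((0 ≤ c ∧ c < m) ∧
            ∃ t ∈ PySem.List.pyRange (max (0 : Int) (ci - PySem.Int.floordiv l (2 : Int))) (min (n - (1 : Int)) (ci + PySem.Int.floordiv l (2 : Int)) + (1 : Int)) (1 : Int),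
              i = t.toNat ∧ j = c.toNat) ∧ j < rowLen mat i)
      then some "x" else cellOf mat i j := by
  unfold pvSide
  by_cases hg : 0 ≤ c ∧ c < m
  · rw [if_pos hg]
    refine (cellOf_foldl _ (fun (t : Int) i' j' => i' = t.toNat ∧ j' = c.toNat)
        (fun mat t i' => rowLen_pvWrite _ _ _ _) ?_ _ _ _ _).trans ?_
    · intro mat t i' j'
      rw [cellOf_pvWrite]
      apply if_congr _ rfl rfl
      tauto
    · apply if_congr _ rfl rfl
      tauto
  · rw [if_neg hg, if_neg (by tauto)]

theorem B_cell (ci cj l : Int) (matriz : List (List String)) (hm : ¬ matriz = []) (i j : Nat) :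
    cellOf (borda_quadrado_alt ci cj l matriz) i j =
      if (Bc1 ci cj l matriz.length (matriz.headD []).length i j ∨
          Bc2 ci cj l matriz.length (matriz.headD []).length i j) ∧ j < rowLen matriz i
      then some "x" else cellOf matriz i j := by
  unfold borda_quadrado_alt
  rw [if_neg hm]
  refine (cellOf_foldl _ (fun (c : Int) i' j' => (0 ≤ c ∧ c < (((matriz.headD []).length : Nat) : Int)) ∧
      ∃ t ∈ PySem.List.pyRange (max (0 : Int) (ci - PySem.Int.floordiv l (2 : Int))) (min (((matriz.length : Nat) : Int) - (1 : Int)) (ci + PySem.Int.floordiv l (2 : Int)) + (1 : Int)) (1 : Int),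
        i' = t.toNat ∧ j' = c.toNat)
      (fun mat c i' => rowLen_pvSide _ _ _ _ _ _ _ _)
      (fun mat c i' j' => cellOf_pvSide _ _ _ _ _ _ _ _ _) _ _ _ _).trans ?_
  rw [rowLen_foldl _ (fun mat r i' => rowLen_pvTopBot _ _ _ _ _ _ _ _) _ _ _]
  rw [cellOf_foldl _ (fun (r : Int) i' j' => (0 ≤ r ∧ r < (((matriz.length : Nat) : Int))) ∧
      ∃ t ∈ PySem.List.pyRange (max (0 : Int) (cj - PySem.Int.floordiv l (2 : Int))) (min ((((matriz.headD []).length : Nat) : Int) - (1 : Int)) (cj + PySem.Int.floordiv l (2 : Int)) + (1 : Int)) (1 : Int),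
        i' = r.toNat ∧ j' = t.toNat)
      (fun mat r i' => rowLen_pvTopBot _ _ _ _ _ _ _ _)
      (fun mat r i' j' => cellOf_pvTopBot _ _ _ _ _ _ _ _ _) _ _ _ _]
  by_cases hj : j < rowLen matriz i
  · by_cases h2 : Bc2 ci cj l matriz.length (matriz.headD []).length i j
    · rw [if_pos ⟨h2, hj⟩, if_pos ⟨Or.inr h2, hj⟩]
    · rw [if_neg (fun hc => h2 hc.1)]
      by_cases h1 : Bc1 ci cj l matriz.length (matriz.headD []).length i j
      · rw [if_pos ⟨h1, hj⟩, if_pos ⟨Or.inl h1, hj⟩]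
      · rw [if_neg (fun hc => h1 hc.1),
          if_neg (fun hc => hc.1.elim h1 h2)]
  · rw [if_neg (fun hc => hj hc.2), if_neg (fun hc => hj hc.2), if_neg (fun hc => hj hc.2)]

theorem length_A (ci cj l : Int) (matriz : List (List String)) :
    (borda_quadrado ci cj l matriz).length = matriz.length := by
  unfold borda_quadrado
  refine length_foldl _ ?_ _ _
  intro mat a
  refine length_foldl _ ?_ _ _
  intro mat b
  split_ifs <;> simp [length_pvWrite]

theorem length_pvTopBot (ci cj l n m : Int) (mat : List (List String)) (r : Int) :
    (pvTopBot ci cj l n m mat r).length = mat.length := by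
  unfold pvTopBot
  split_ifs
  · exact length_foldl _ (fun _ _ => length_pvWrite _ _ _) _ _
  · rfl

theorem length_pvSide (ci cj l n m : Int) (mat : List (List String)) (c : Int) :
    (pvSide ci cj l n m mat c).length = mat.length := by
  unfold pvSide
  split_ifs
  · exact length_foldl _ (fun _ _ => length_pvWrite _ _ _) _ _
  · rfl

theorem length_B (ci cj l : Int) (matriz : List (List String)) :
    (borda_quadrado_alt ci cj l matriz).length = matriz.length := by
  unfold borda_quadrado_alt
  split_ifs
  · rfl
  · rw [length_foldl _ (fun mat c => length_pvSide _ _ _ _ _ _ _) _ _,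
      length_foldl _ (fun mat r => length_pvTopBot _ _ _ _ _ _ _) _ _]

theorem cond_iff (ci cj l : Int) (n m : Nat) (i j : Nat) :
    (i < n ∧ j < m ∧ Acond ci cj l i j) ↔
      (Bc1 ci cj l n m i j ∨ Bc2 ci cj l n m i j) := by
  unfold Acond Bc1 Bc2 hh
  generalize PySem.Int.floordiv l (2 : Int) = h
  simp only [List.mem_cons, List.not_mem_nil, or_false,
    PySem.List.mem_pyRange_one]
  constructor
  · rintro ⟨hi, hj, ⟨hr, hc⟩ | ⟨hc, hr⟩⟩
    · exact Or.inl ⟨(i : Int), by omega, ⟨by omega, by omega⟩, (j : Int), by omega, by omega, by omega⟩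
    · exact Or.inr ⟨(j : Int), by omega, ⟨by omega, by omega⟩, (i : Int), by omega, by omega, by omega⟩
  · rintro (⟨r, hr, ⟨hr0, hrn⟩, t, ht, rfl, rfl⟩ | ⟨c, hc, ⟨hc0, hcm⟩, t, ht, rfl, rfl⟩)
    · refine ⟨by omega, by omega, Or.inl ⟨by omega, by omega⟩⟩
    · refine ⟨by omega, by omega, Or.inr ⟨by omega, by omega⟩⟩

-- ===== VERDICT (by name: the statement is the Claim_ definition above) =====
theorem borda_quadrado_spec : Claim_equal_borda_quadrado := by
  intro ci cj l matriz _ _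
  unfold Spec_borda_quadrado
  by_cases hm : matriz = []
  · subst hm
    simp [borda_quadrado, borda_quadrado_alt]
  · apply eq_of_cells
    · rw [length_A, length_B]
    · intro i j
      rw [A_cell, B_cell ci cj l matriz hm]
      exact if_congr (and_congr_left' (cond_iff ci cj l matriz.length (matriz.headD []).length i j)) rfl rfl
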